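-- pv_equiv track=rewrite | github.com/JLOLYR/calendario-astral | RespaldoCalendario_28072025/Fun_Astral.py | asignar_cruz
-- ===== SOURCE A (Python) =====
-- def asignar_cruz(signo):
--     cruces = {
--         'Cardinal': ['Aries', 'Libra', 'Cancer', 'Capricorn'],
--         'Fijo': ['Taurus', 'Leo', 'Scorpio', 'Aquarius'],
--         'Mutable': ['Gemini', 'Virgo', 'Sagittarius', 'Pisces']
--     }
--     for cruz, signos in cruces.items():
--         if signo in signos:
--             return cruz
--     return 'Desconocido'
-- ===== SOURCE B (Python) =====
-- _CRUZ_POR_SIGNO = {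
--     'Aries': 'Cardinal', 'Taurus': 'Fijo', 'Gemini': 'Mutable',
--     'Cancer': 'Cardinal', 'Leo': 'Fijo', 'Virgo': 'Mutable',
--     'Libra': 'Cardinal', 'Scorpio': 'Fijo', 'Sagittarius': 'Mutable',
--     'Capricorn': 'Cardinal', 'Aquarius': 'Fijo', 'Pisces': 'Mutable',
-- }
--
-- def asignar_cruz(signo):
--     return _CRUZ_POR_SIGNO.get(signo, 'Desconocido')
-- ===== Notes on version B (the rewrite author's own statement) =====
-- stated objective: idiomatic
-- what changed: Replaces the loop over three group lists with per-group membership scans by a single flat sign-to-cross dict consulted with one .get lookup and no loop.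
import Mathlib
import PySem

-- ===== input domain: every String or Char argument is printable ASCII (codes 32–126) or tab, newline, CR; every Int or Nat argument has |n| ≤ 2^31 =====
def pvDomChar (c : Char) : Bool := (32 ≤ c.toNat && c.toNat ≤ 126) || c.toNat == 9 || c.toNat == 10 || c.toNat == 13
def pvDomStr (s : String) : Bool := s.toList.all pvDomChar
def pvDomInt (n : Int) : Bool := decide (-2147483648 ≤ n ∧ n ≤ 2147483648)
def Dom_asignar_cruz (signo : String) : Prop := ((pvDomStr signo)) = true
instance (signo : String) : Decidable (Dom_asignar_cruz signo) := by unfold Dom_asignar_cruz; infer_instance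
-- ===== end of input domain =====

-- B replaces the per-group membership loop by a single flat sign→cross dict lookup (idiomatic).


-- ===== PORT A =====
-- loop over the dict items in insertion order; early return on membership
def asignarCruzLoop (items : List (String × List String)) (signo : String) : String :=
  match items with
  | [] => "Desconocido"
  | (cruz, signos) :: rest =>
      if signos.contains signo then cruz else asignarCruzLoop rest signo

def asignar_cruz (signo : String) : String :=
  let cruces : List (String × List String) :=
    [("Cardinal", ["Aries", "Libra", "Cancer", "Capricorn"]),
     ("Fijo", ["Taurus", "Leo", "Scorpio", "Aquarius"]),
     ("Mutable", ["Gemini", "Virgo", "Sagittarius", "Pisces"])]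
  asignarCruzLoop cruces signo

-- ===== PORT B =====
-- flat reverse-lookup dict, one .get with default
def cruzPorSigno : PySem.Dict String String :=
  PySem.Dict.mk
  [("Aries", "Cardinal"), ("Taurus", "Fijo"), ("Gemini", "Mutable"),
   ("Cancer", "Cardinal"), ("Leo", "Fijo"), ("Virgo", "Mutable"),
   ("Libra", "Cardinal"), ("Scorpio", "Fijo"), ("Sagittarius", "Mutable"),
   ("Capricorn", "Cardinal"), ("Aquarius", "Fijo"), ("Pisces", "Mutable")]

def asignar_cruz_alt (signo : String) : String :=
  PySem.Dict.getD cruzPorSigno signo "Desconocido"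

-- ===== PRECONDITION & SPEC =====
def Spec_asignar_cruz (signo : String) (out : String) : Prop := out = asignar_cruz_alt signo
instance (signo : String) (out : String) : Decidable (Spec_asignar_cruz signo out) := by unfold Spec_asignar_cruz; infer_instance

-- ===== CLAIM (what is proved, stated in full; the proofs are below) =====
def Claim_equal_asignar_cruz : Prop := ∀ (signo : String), Dom_asignar_cruz signo → Spec_asignar_cruz signo (asignar_cruz signo)

-- ===== LEMMAS AND PROOFS =====

-- ===== VERDICT (by name: the statement is the Claim_ definition above) =====
theorem asignar_cruz_spec : Claim_equal_asignar_cruz := by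
  intro signo _
  unfold Spec_asignar_cruz
  by_cases h1 : signo = "Aries"
  · subst h1
    simp [asignar_cruz, asignar_cruz_alt, asignarCruzLoop, cruzPorSigno,
      PySem.Dict.getD, PySem.Dict.get?_mk_cons]
  by_cases h2 : signo = "Libra"
  · subst h2
    simp [asignar_cruz, asignar_cruz_alt, asignarCruzLoop, cruzPorSigno,
      PySem.Dict.getD, PySem.Dict.get?_mk_cons]
  by_cases h3 : signo = "Cancer"
  · subst h3
    simp [asignar_cruz, asignar_cruz_alt, asignarCruzLoop, cruzPorSigno,
      PySem.Dict.getD, PySem.Dict.get?_mk_cons]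
  by_cases h4 : signo = "Capricorn"
  · subst h4
    simp [asignar_cruz, asignar_cruz_alt, asignarCruzLoop, cruzPorSigno,
      PySem.Dict.getD, PySem.Dict.get?_mk_cons]
  by_cases h5 : signo = "Taurus"
  · subst h5
    simp [asignar_cruz, asignar_cruz_alt, asignarCruzLoop, cruzPorSigno,
      PySem.Dict.getD, PySem.Dict.get?_mk_cons]
  by_cases h6 : signo = "Leo"
  · subst h6
    simp [asignar_cruz, asignar_cruz_alt, asignarCruzLoop, cruzPorSigno,
      PySem.Dict.getD, PySem.Dict.get?_mk_cons]
  by_cases h7 : signo = "Scorpio"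
  · subst h7
    simp [asignar_cruz, asignar_cruz_alt, asignarCruzLoop, cruzPorSigno,
      PySem.Dict.getD, PySem.Dict.get?_mk_cons]
  by_cases h8 : signo = "Aquarius"
  · subst h8
    simp [asignar_cruz, asignar_cruz_alt, asignarCruzLoop, cruzPorSigno,
      PySem.Dict.getD, PySem.Dict.get?_mk_cons]
  by_cases h9 : signo = "Gemini"
  · subst h9
    simp [asignar_cruz, asignar_cruz_alt, asignarCruzLoop, cruzPorSigno,
      PySem.Dict.getD, PySem.Dict.get?_mk_cons]
  by_cases h10 : signo = "Virgo"
  · subst h10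
    simp [asignar_cruz, asignar_cruz_alt, asignarCruzLoop, cruzPorSigno,
      PySem.Dict.getD, PySem.Dict.get?_mk_cons]
  by_cases h11 : signo = "Sagittarius"
  · subst h11
    simp [asignar_cruz, asignar_cruz_alt, asignarCruzLoop, cruzPorSigno,
      PySem.Dict.getD, PySem.Dict.get?_mk_cons]
  by_cases h12 : signo = "Pisces"
  · subst h12
    simp [asignar_cruz, asignar_cruz_alt, asignarCruzLoop, cruzPorSigno,
      PySem.Dict.getD, PySem.Dict.get?_mk_cons]
  simp [asignar_cruz, asignar_cruz_alt, asignarCruzLoop, cruzPorSigno,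
    PySem.Dict.getD, PySem.Dict.get?_mk_cons,
    h1, h2, h3, h4, h5, h6, h7, h8, h9, h10, h11, h12]
  have g1 : ¬("Aries" = signo) := fun he => h1 he.symm
  have g2 : ¬("Libra" = signo) := fun he => h2 he.symm
  have g3 : ¬("Cancer" = signo) := fun he => h3 he.symm
  have g4 : ¬("Capricorn" = signo) := fun he => h4 he.symm
  have g5 : ¬("Taurus" = signo) := fun he => h5 he.symm
  have g6 : ¬("Leo" = signo) := fun he => h6 he.symm
  have g7 : ¬("Scorpio" = signo) := fun he => h7 he.symm
  have g8 : ¬("Aquarius" = signo) := fun he => h8 he.symm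
  have g9 : ¬("Gemini" = signo) := fun he => h9 he.symm
  have g10 : ¬("Virgo" = signo) := fun he => h10 he.symm
  have g11 : ¬("Sagittarius" = signo) := fun he => h11 he.symm
  have g12 : ¬("Pisces" = signo) := fun he => h12 he.symm
  simp only [if_neg g1, if_neg g2, if_neg g3, if_neg g4, if_neg g5, if_neg g6,
    if_neg g7, if_neg g8, if_neg g9, if_neg g10, if_neg g11, if_neg g12]
  rfl
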